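-- pv_equiv track=rewrite | github.com/pypi-data/pypi-mirror-328 | packages/endecrypter/endecrypter-1.20.21-py3-none-any.whl/EnDecrypter/monoalfabetico.py | descifrar_monoalfabetico
-- ===== SOURCE A (Python) =====
-- def descifrar_monoalfabetico(texto, alfabeto_sustituto):
--     alfabeto_inverso = {v: k for k, v in alfabeto_sustituto.items()}
--     texto_descifrado = []
--     for letra in texto:
--         if letra.lower() in alfabeto_inverso:
--             nueva_letra = alfabeto_inverso[letra.lower()]
--             if letra.isupper():
--                 nueva_letra = nueva_letra.upper()
--             texto_descifrado.append(nueva_letra)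
--         else:
--             texto_descifrado.append(letra)
--     return ''.join(texto_descifrado)
-- ===== SOURCE B (Python) =====
-- def descifrar_monoalfabetico(texto, alfabeto_sustituto):
--     inverso = {v: k for k, v in alfabeto_sustituto.items()}
--     tabla = {}
--     for letra in set(texto):
--         clave = inverso.get(letra.lower())
--         if clave is not None:
--             tabla[ord(letra)] = clave.upper() if letra.isupper() else clave
--     return texto.translate(tabla)
-- ===== Notes on version B (the rewrite author's own statement) =====
-- stated objective: idiomatic
-- what changed: Instead of branching per character while appending to a list, B precomputes a codepoint-keyed translation table over the distinct characters of the text (one case-insensitive lookup per distinct character) and produces the result with a single str.translate pass.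
import Mathlib
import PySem

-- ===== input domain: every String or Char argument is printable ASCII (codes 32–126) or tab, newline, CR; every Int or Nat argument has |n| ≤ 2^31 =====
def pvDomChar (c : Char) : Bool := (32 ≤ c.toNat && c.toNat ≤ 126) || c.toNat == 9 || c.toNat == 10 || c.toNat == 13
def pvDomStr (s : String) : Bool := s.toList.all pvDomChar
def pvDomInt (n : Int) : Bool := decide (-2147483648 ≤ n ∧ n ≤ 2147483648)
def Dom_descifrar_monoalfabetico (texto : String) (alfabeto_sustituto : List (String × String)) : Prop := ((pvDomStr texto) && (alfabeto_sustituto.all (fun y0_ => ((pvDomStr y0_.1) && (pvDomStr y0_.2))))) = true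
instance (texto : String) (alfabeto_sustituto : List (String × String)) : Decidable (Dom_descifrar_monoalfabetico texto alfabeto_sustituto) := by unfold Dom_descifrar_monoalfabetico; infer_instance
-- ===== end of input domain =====

-- B precomputes a codepoint-keyed translation table over the text's distinct
-- characters and produces the result in one translate pass (objective: idiomatic).

-- ===== PORT A =====
def descifrar_monoalfabetico (texto : String) (alfabeto_sustituto : List (String × String)) : String :=
  -- alfabeto_inverso = {v: k for k, v in alfabeto_sustituto.items()}
  let alfabeto_inverso : PySem.Dict String String :=
    alfabeto_sustituto.foldl (fun d p => d.insert p.2 p.1) PySem.Dict.empty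
  -- for letra in texto: …
  let texto_descifrado : List String :=
    texto.toList.foldl (fun acc letra =>
      let lw := String.ofList (PySem.Chars.lower [letra])   -- letra.lower()
      if alfabeto_inverso.contains lw then
        let nueva_letra := (alfabeto_inverso.get? lw).getD ""   -- lookup guarded by `contains`, cannot fail
        let nueva_letra := if PySem.Chars.isupper letra then PySem.Str.upper nueva_letra else nueva_letra
        acc ++ [nueva_letra]
      else acc ++ [String.ofList [letra]]) []
  PySem.Str.join "" texto_descifrado

-- ===== PORT B =====
def descifrar_monoalfabetico_alt (texto : String) (alfabeto_sustituto : List (String × String)) : String :=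
  -- inverso = {v: k for k, v in alfabeto_sustituto.items()}
  let inverso : PySem.Dict String String :=
    alfabeto_sustituto.foldl (fun d p => d.insert p.2 p.1) PySem.Dict.empty
  -- for letra in set(texto): … (a per-distinct-character table; each entry depends only
  -- on its own character, so the set's iteration order cannot affect the table)
  let tabla : PySem.Dict Char String :=
    (PySem.Set.ofList texto.toList).foldl (fun t letra =>
      match inverso.get? (String.ofList (PySem.Chars.lower [letra])) with
      | some clave => t.insert letra (if PySem.Chars.isupper letra then PySem.Str.upper clave else clave)
      | none => t) PySem.Dict.empty
  -- texto.translate(tabla): per-codepoint lookup, identity where the table has no entry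
  PySem.Str.join "" (texto.toList.map (fun letra => (tabla.get? letra).getD (String.ofList [letra])))

-- ===== PRECONDITION & SPEC =====
def Spec_descifrar_monoalfabetico (texto : String) (alfabeto_sustituto : List (String × String)) (out : String) : Prop := out = descifrar_monoalfabetico_alt texto alfabeto_sustituto
instance (texto : String) (alfabeto_sustituto : List (String × String)) (out : String) : Decidable (Spec_descifrar_monoalfabetico texto alfabeto_sustituto out) := by unfold Spec_descifrar_monoalfabetico; infer_instance

-- ===== CLAIM (what is proved, stated in full; the proofs are below) =====
def Claim_equal_descifrar_monoalfabetico : Prop := ∀ (texto : String) (alfabeto_sustituto : List (String × String)), Dom_descifrar_monoalfabetico texto alfabeto_sustituto → Spec_descifrar_monoalfabetico texto alfabeto_sustituto (descifrar_monoalfabetico texto alfabeto_sustituto)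

-- ===== LEMMAS AND PROOFS =====

-- the per-character table value B stores for a character (none = no entry)
def tablaVal (inverso : PySem.Dict String String) (letra : Char) : Option String :=
  (inverso.get? (String.ofList (PySem.Chars.lower [letra]))).map
    (fun clave => if PySem.Chars.isupper letra then PySem.Str.upper clave else clave)

lemma step_get (inverso : PySem.Dict String String) (t : PySem.Dict Char String) (x c : Char) :
    ((match inverso.get? (String.ofList (PySem.Chars.lower [x])) with
      | some clave => t.insert x (if PySem.Chars.isupper x then PySem.Str.upper clave else clave)
      | none => t) : PySem.Dict Char String).get? c =
      if c = x ∧ (tablaVal inverso x).isSome then tablaVal inverso x else t.get? c := by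
  unfold tablaVal
  rcases hx : inverso.get? (String.ofList (PySem.Chars.lower [x])) with _ | clave
  · simp
  · simp [PySem.Dict.get?_insert]

lemma tabla_get (inverso : PySem.Dict String String) (S : List Char)
    (t : PySem.Dict Char String) (c : Char) :
    (S.foldl (fun t letra =>
        match inverso.get? (String.ofList (PySem.Chars.lower [letra])) with
        | some clave => t.insert letra (if PySem.Chars.isupper letra then PySem.Str.upper clave else clave)
        | none => t) t).get? c =
      if c ∈ S ∧ (tablaVal inverso c).isSome then tablaVal inverso c else t.get? c := by
  induction S generalizing t with
  | nil => simp
  | cons x S ih =>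
    rw [List.foldl_cons, ih, step_get]
    by_cases hP : (tablaVal inverso c).isSome = true
    · by_cases hmem : c ∈ S
      · simp [hmem, hP]
      · by_cases hcx : c = x
        · subst hcx
          simp [hmem, hP]
        · simp [hmem, hcx, hP]
    · have hcx : ¬ (c = x ∧ (tablaVal inverso x).isSome = true) := by
        rintro ⟨rfl, h⟩
        exact hP h
      simp [hP, hcx]

lemma perChar (inverso : PySem.Dict String String) (texto : List Char) (c : Char)
    (hc : c ∈ texto) :
    (if inverso.contains (String.ofList (PySem.Chars.lower [c])) then
        (if PySem.Chars.isupper c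
          then PySem.Str.upper ((inverso.get? (String.ofList (PySem.Chars.lower [c]))).getD "")
          else (inverso.get? (String.ofList (PySem.Chars.lower [c]))).getD "")
      else String.ofList [c]) =
      ((((PySem.Set.ofList texto).foldl (fun t letra =>
        match inverso.get? (String.ofList (PySem.Chars.lower [letra])) with
        | some clave => t.insert letra (if PySem.Chars.isupper letra then PySem.Str.upper clave else clave)
        | none => t) PySem.Dict.empty).get? c).getD (String.ofList [c])) := by
  rw [tabla_get, PySem.Dict.contains_eq_isSome_get?]
  have hmem : c ∈ PySem.Set.ofList texto := (PySem.Set.mem_ofList _ _).mpr hc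
  rcases hx : inverso.get? (String.ofList (PySem.Chars.lower [c])) with _ | clave
  · have hval : tablaVal inverso c = none := by unfold tablaVal; rw [hx]; rfl
    have hn : ¬ (c ∈ PySem.Set.ofList texto ∧ (tablaVal inverso c).isSome = true) := by
      rw [hval]; simp
    rw [if_neg hn, PySem.Dict.get?_empty]
    simp
  · have hval : tablaVal inverso c = some (if PySem.Chars.isupper c then PySem.Str.upper clave else clave) := by
      unfold tablaVal; rw [hx]; rfl
    have hs : (tablaVal inverso c).isSome = true := by rw [hval]; rfl
    rw [if_pos (And.intro hmem hs), hval]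
    by_cases hu : PySem.Chars.isupper c <;> simp [hu]

-- ===== VERDICT (by name: the statement is the Claim_ definition above) =====
theorem descifrar_monoalfabetico_spec : Claim_equal_descifrar_monoalfabetico := by
  intro texto alf _
  unfold Spec_descifrar_monoalfabetico descifrar_monoalfabetico descifrar_monoalfabetico_alt
  simp only []
  have hstep : (fun (acc : List String) (letra : Char) =>
      let lw := String.ofList (PySem.Chars.lower [letra])
      if (alf.foldl (fun d p => d.insert p.2 p.1) PySem.Dict.empty).contains lw then
        let nueva_letra := ((alf.foldl (fun d p => d.insert p.2 p.1) PySem.Dict.empty).get? lw).getD ""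
        let nueva_letra := if PySem.Chars.isupper letra then PySem.Str.upper nueva_letra else nueva_letra
        acc ++ [nueva_letra]
      else acc ++ [String.ofList [letra]]) = (fun acc letra => acc ++
        [if (alf.foldl (fun d p => d.insert p.2 p.1) PySem.Dict.empty).contains
            (String.ofList (PySem.Chars.lower [letra])) then
          (if PySem.Chars.isupper letra
            then PySem.Str.upper (((alf.foldl (fun d p => d.insert p.2 p.1) PySem.Dict.empty).get?
                  (String.ofList (PySem.Chars.lower [letra]))).getD "")
            else ((alf.foldl (fun d p => d.insert p.2 p.1) PySem.Dict.empty).get?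
                  (String.ofList (PySem.Chars.lower [letra]))).getD "")
          else String.ofList [letra]]) := by
    funext acc letra
    by_cases h : (alf.foldl (fun d p => d.insert p.2 p.1) PySem.Dict.empty).contains
        (String.ofList (PySem.Chars.lower [letra])) <;> simp [h]
  rw [hstep, PySem.List.foldl_append_singleton_eq_map, List.nil_append]
  congr 1
  apply List.map_congr_left
  intro c hcmem
  exact perChar (alf.foldl (fun d p => d.insert p.2 p.1) PySem.Dict.empty) texto.toList c hcmem
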